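-- pv_equiv track=rewrite | github.com/pypi-data/pypi-mirror-208 | packages/unicode-name-inquiry/unicode_name_inquiry-1.9.1-py3-none-any.whl/uc/format.py | utf32to8
-- ===== SOURCE A (Python) =====
-- from collections.abc import Iterable, Sequence
--
-- def utf32to8(n: int) -> Sequence[int]:
--     """Converts a number to a list holding its UTF-8 encoding."""
--     if n < 0x80:
--         return [n]
--     r = []
--     m = 0x1F
--     while True:
--         r.append(0x80 | (n & 0x3F))
--         n = n >> 6
--         if n & m == n:
--             break
--         m = m >> 1
--     r.append((0xFE ^ (m << 1)) | n)
--     r.reverse()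
--     return r
-- ===== SOURCE B (Python) =====
-- def utf32to8(n):
--     """Converts a number to a list holding its UTF-8 (FSS-UTF, up to 6 bytes) encoding."""
--     if n < 0x80:
--         return [n]
--     b = n.bit_length()
--     if b > 31:
--         raise ValueError("out of range for a 6-byte UTF-8 sequence")
--     c = 1 if b <= 11 else 2 if b <= 16 else 3 if b <= 21 else 4 if b <= 26 else 5
--     lead = (0x100 - (0x100 >> (c + 1))) | (n >> (6 * c))
--     return [lead] + [0x80 | ((n >> (6 * i)) & 0x3F) for i in range(c - 1, -1, -1)]
-- ===== Notes on version B (the rewrite author's own statement) =====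
-- stated objective: alternative
-- what changed: A discovers the byte count incrementally with a shrinking mask, building bytes least-significant-first and reversing; B computes the continuation-byte count up front from n.bit_length() and emits the leader and continuation bytes most-significant-first in one forward pass; Pre_ excludes values too wide for the longest UTF-8 (FSS-UTF) sequence, where A returns a list led by a byte that is not a valid UTF-8 leader and B raises ValueError.
-- outside the precondition, e.g. on utf32to8(2147483648): A returns [254, 130, 128, 128, 128, 128, 128], B raises ValueError
import Mathlib
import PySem

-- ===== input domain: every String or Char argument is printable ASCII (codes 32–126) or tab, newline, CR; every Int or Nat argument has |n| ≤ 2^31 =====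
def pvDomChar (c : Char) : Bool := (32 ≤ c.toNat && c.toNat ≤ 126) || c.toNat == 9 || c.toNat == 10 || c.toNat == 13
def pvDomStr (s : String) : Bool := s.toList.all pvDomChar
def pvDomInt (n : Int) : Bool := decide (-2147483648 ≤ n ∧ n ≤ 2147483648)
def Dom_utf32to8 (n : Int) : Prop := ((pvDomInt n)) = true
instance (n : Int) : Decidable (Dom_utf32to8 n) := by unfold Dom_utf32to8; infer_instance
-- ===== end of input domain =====

-- B computes the continuation-byte count up front from n.bit_length() and emits the bytes
-- most-significant-first in one forward pass (no reversal, no running mask); objective: alternative decomposition.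

-- ===== PORT A =====
-- A's while-True loop, bottom-up: append the low 6 bits, shift, until the rest fits under the
-- shrinking mask m; then append the leader and reverse. The fuel of 64 is never exhausted on
-- the stated domain (|n| ≤ 2^31 needs at most 6 iterations).
def utf32to8Loop (fuel : Nat) (n m : Int) (r : List Int) : List Int :=
  match fuel with
  | 0 => r
  | fuel + 1 =>
    let r' := r ++ [PySem.Int.bor 0x80 (PySem.Int.band n 0x3F)]
    let n' := n >>> (6 : Nat)
    if PySem.Int.band n' m = n' then
      (r' ++ [PySem.Int.bor (PySem.Int.bxor 0xFE (m <<< (1 : Nat))) n']).reverse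
    else utf32to8Loop fuel n' (m >>> (1 : Nat)) r'

def utf32to8 (n : Int) : List Int :=
  if n < 0x80 then [n] else utf32to8Loop 64 n 0x1F []

-- ===== PORT B =====
def utf32to8_alt (n : Int) : List Int :=
  if n < 0x80 then [n]
  else
    let b : Int := (PySem.Int.bitLength n : Int)
    if b > 31 then []  -- Source B raises ValueError here; excluded by Pre_
    else
      let c : Int :=
        if b ≤ 11 then 1 else if b ≤ 16 then 2 else if b ≤ 21 then 3
        else if b ≤ 26 then 4 else 5
      let lead : Int :=
        PySem.Int.bor (0x100 - ((0x100 : Int) >>> (c + 1).toNat)) (n >>> (6 * c).toNat)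
      [lead] ++ (PySem.List.pyRange (c - 1) (-1) (-1)).map
        (fun i => PySem.Int.bor 0x80 (PySem.Int.band (n >>> (6 * i).toNat) 0x3F))

-- ===== PRECONDITION & SPEC =====
-- Pre_ excludes values too wide for the longest UTF-8 (FSS-UTF) sequence, where A's result is
-- led by a byte that is not a valid UTF-8 leader and B raises ValueError.
def Pre_utf32to8 (n : Int) : Prop := n ≤ 0x7FFFFFFF
instance (n : Int) : Decidable (Pre_utf32to8 n) := by unfold Pre_utf32to8; infer_instance
def pvWitness_utf32to8 : Int := 1000
def Spec_utf32to8 (n : Int) (out : List Int) : Prop := out = utf32to8_alt n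
instance (n : Int) (out : List Int) : Decidable (Spec_utf32to8 n out) := by unfold Spec_utf32to8; infer_instance

-- ===== CLAIM (what is proved, stated in full; the proofs are below) =====
def Claim_equal_utf32to8 : Prop := ∀ (n : Int), Dom_utf32to8 n → Pre_utf32to8 n → Spec_utf32to8 n (utf32to8 n)

-- ===== LEMMAS AND PROOFS =====

lemma band_mask_eq_self_iff (a : Int) (k : Nat) (ha : 0 ≤ a) :
    (PySem.Int.band a ((2 : Int) ^ k - 1) = a) ↔ a < 2 ^ k := by
  have hp : 0 < (2:Nat)^k := Nat.two_pow_pos k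
  have h3 : ((2:Int)^k) = ((2^k : Nat) : Int) := by push_cast; ring
  have hm : (0:Int) ≤ (2:Int)^k - 1 := by omega
  rw [PySem.Int.band_of_nonneg ha hm]
  have h2 : ((2:Int)^k - 1).toNat = 2^k - 1 := by omega
  rw [h2, Nat.and_two_pow_sub_one_eq_mod]
  constructor
  · intro h
    have := Nat.mod_lt a.toNat (y := 2^k) hp
    omega
  · intro h
    have : a.toNat < 2^k := by omega
    rw [Nat.mod_eq_of_lt this]; omega

lemma bitLength_le (n : Int) (b : Nat) (h : n < 2 ^ b) (hn : 0 ≤ n) :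
    PySem.Int.bitLength n ≤ b := by
  by_contra hc
  have h1 := PySem.Int.two_pow_bitLength_le n
  by_cases h0 : n = 0
  · simp [h0, PySem.Int.bitLength_zero] at hc
  · have h1 := h1 h0
    have : 2^b ≤ 2^(PySem.Int.bitLength n - 1) := Nat.pow_le_pow_right (by omega) (by omega)
    have hna : n.natAbs = n.toNat := by omega
    have h2 : ((2:Int)^b) = ((2^b : Nat) : Int) := by push_cast; ring
    omega

lemma lt_bitLength (n : Int) (a : Nat) (h : (2 : Int) ^ a ≤ n) :
    a < PySem.Int.bitLength n := by
  have h1 := PySem.Int.lt_two_pow_bitLength n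
  have h2 : ((2:Int)^a) = ((2^a : Nat) : Int) := by push_cast; ring
  rw [h2] at h
  have hp : 0 < (2:Nat)^a := Nat.two_pow_pos a
  have hna : n.natAbs = n.toNat := by omega
  by_contra hc
  have : 2^(PySem.Int.bitLength n) ≤ 2^a := Nat.pow_le_pow_right (by omega) (by omega)
  omega

-- one unfolding step of A's loop
lemma loop_step (fuel : Nat) (n m : Int) (r : List Int) :
    utf32to8Loop (fuel+1) n m r =
      if PySem.Int.band (n >>> (6:Nat)) m = n >>> (6:Nat) then
        ((r ++ [PySem.Int.bor 0x80 (PySem.Int.band n 0x3F)]) ++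
          [PySem.Int.bor (PySem.Int.bxor 0xFE (m <<< (1:Nat))) (n >>> (6:Nat))]).reverse
      else utf32to8Loop fuel (n >>> (6:Nat)) (m >>> (1:Nat))
             (r ++ [PySem.Int.bor 0x80 (PySem.Int.band n 0x3F)]) := rfl

lemma case1 (n : Int) (h1 : 128 ≤ n) (h2 : n < 2048) : utf32to8 n = utf32to8_alt n := by
  have hn0 : (0:Int) ≤ n := by omega
  have e64 : (((2:Nat)^6 : Nat) : Int) = 64 := by norm_num
  have hs1 : n >>> (6:Nat) = n / 64 := by rw [Int.shiftRight_eq_div_pow, e64]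
  have hb6 : n >>> (6:Nat) = n / 64 := hs1
  have hi6 : n >>> (6:Int) = n / 64 := by simpa using (Int.shiftRight_natCast_right n 6).trans hb6
  have hm1 := band_mask_eq_self_iff (n / 64) 5 (by omega)
  norm_num at hm1
  have hc1 : PySem.Int.band (n / 64) 31 = n / 64 := hm1.mpr (by omega)
  have hble : PySem.Int.bitLength n ≤ 11 := bitLength_le n 11 (by (have e : ((2:Int)^11) = 2048 := by norm_num); omega) hn0
  have hbl0 := lt_bitLength n 7 (by (have e : ((2:Int)^7) = 128 := by norm_num); omega)
  have el : PySem.Int.bxor 254 ((31:Int) <<< (1:Nat)) = 192 := by decide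
  simp only [utf32to8, utf32to8_alt]
  rw [if_neg (by omega), if_neg (by omega)]
  rw [show (64:Nat) = 63+1 from rfl, loop_step, hs1]
  rw [if_pos hc1, el]
  rw [if_neg (show ¬((PySem.Int.bitLength n : Int) > 31) by omega)]
  rw [if_pos (show ((PySem.Int.bitLength n : Int) ≤ 11) by omega)]
  have hr : PySem.List.pyRange (0) (-1) (-1) = [0] := by decide
  have hlead : (256:Int) >>> (2:Nat) = 64 := by decide
  have t2 : ((2:Int)).toNat = 2 := rfl
  have t6 : ((6:Int)).toNat = 6 := rfl
  have hz : n >>> (0:Nat) = n := by rw [Int.shiftRight_eq_div_pow]; norm_num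
  have hz' : n >>> (0:Int) = n := by simpa using (Int.shiftRight_natCast_right n 0).trans hz
  norm_num [hr, hlead, t2, t6, hz, hz', hb6, hi6]

lemma case2 (n : Int) (h1 : 2048 ≤ n) (h2 : n < 65536) : utf32to8 n = utf32to8_alt n := by
  have hn0 : (0:Int) ≤ n := by omega
  have e64 : (((2:Nat)^6 : Nat) : Int) = 64 := by norm_num
  have hs1 : n >>> (6:Nat) = n / 64 := by rw [Int.shiftRight_eq_div_pow, e64]
  have hs2 : (n / 64) >>> (6:Nat) = n / 4096 := by rw [Int.shiftRight_eq_div_pow, e64]; omega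
  have hb6 : n >>> (6:Nat) = n / 64 := hs1
  have hb12 : n >>> (12:Nat) = n / 4096 := by
    rw [Int.shiftRight_eq_div_pow]
    have e : (((2:Nat)^12 : Nat) : Int) = 4096 := by norm_num
    rw [e]
  have hi6 : n >>> (6:Int) = n / 64 := by simpa using (Int.shiftRight_natCast_right n 6).trans hb6
  have hi12 : n >>> (12:Int) = n / 4096 := by simpa using (Int.shiftRight_natCast_right n 12).trans hb12
  have hm1 := band_mask_eq_self_iff (n / 64) 5 (by omega)
  norm_num at hm1
  have hc1 : ¬ (PySem.Int.band (n / 64) 31 = n / 64) := fun hC => absurd (hm1.mp hC) (by omega)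
  have hm2 := band_mask_eq_self_iff (n / 4096) 4 (by omega)
  norm_num at hm2
  have hc2 : PySem.Int.band (n / 4096) 15 = n / 4096 := hm2.mpr (by omega)
  have hbl1 := lt_bitLength n 11 (by (have e : ((2:Int)^11) = 2048 := by norm_num); omega)
  have hble : PySem.Int.bitLength n ≤ 16 := bitLength_le n 16 (by (have e : ((2:Int)^16) = 65536 := by norm_num); omega) hn0
  have el : PySem.Int.bxor 254 ((15:Int) <<< (1:Nat)) = 224 := by decide
  simp only [utf32to8, utf32to8_alt]
  rw [if_neg (by omega), if_neg (by omega)]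
  rw [show (64:Nat) = 63+1 from rfl, loop_step, hs1]
  rw [if_neg hc1]
  rw [show (63:Nat) = 62+1 from rfl, loop_step, hs2]
  rw [show (31:Int) >>> (1:Nat) = 15 from by decide]
  rw [if_pos hc2, el]
  rw [if_neg (show ¬((PySem.Int.bitLength n : Int) > 31) by omega)]
  rw [if_neg (show ¬((PySem.Int.bitLength n : Int) ≤ 11) by omega)]
  rw [if_pos (show ((PySem.Int.bitLength n : Int) ≤ 16) by omega)]
  have hr : PySem.List.pyRange (1) (-1) (-1) = [1, 0] := by decide
  have hlead : (256:Int) >>> (3:Nat) = 32 := by decide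
  have t3 : ((3:Int)).toNat = 3 := rfl
  have t6 : ((6:Int)).toNat = 6 := rfl
  have t12 : ((12:Int)).toNat = 12 := rfl
  have hz : n >>> (0:Nat) = n := by rw [Int.shiftRight_eq_div_pow]; norm_num
  have hz' : n >>> (0:Int) = n := by simpa using (Int.shiftRight_natCast_right n 0).trans hz
  norm_num [hr, hlead, t3, t6, t12, hz, hz', hb6, hb12, hi6, hi12]

lemma case3 (n : Int) (h1 : 65536 ≤ n) (h2 : n < 2097152) : utf32to8 n = utf32to8_alt n := by
  have hn0 : (0:Int) ≤ n := by omega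
  have e64 : (((2:Nat)^6 : Nat) : Int) = 64 := by norm_num
  have hs1 : n >>> (6:Nat) = n / 64 := by rw [Int.shiftRight_eq_div_pow, e64]
  have hs2 : (n / 64) >>> (6:Nat) = n / 4096 := by rw [Int.shiftRight_eq_div_pow, e64]; omega
  have hs3 : (n / 4096) >>> (6:Nat) = n / 262144 := by rw [Int.shiftRight_eq_div_pow, e64]; omega
  have hb6 : n >>> (6:Nat) = n / 64 := hs1
  have hb12 : n >>> (12:Nat) = n / 4096 := by
    rw [Int.shiftRight_eq_div_pow]
    have e : (((2:Nat)^12 : Nat) : Int) = 4096 := by norm_num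
    rw [e]
  have hb18 : n >>> (18:Nat) = n / 262144 := by
    rw [Int.shiftRight_eq_div_pow]
    have e : (((2:Nat)^18 : Nat) : Int) = 262144 := by norm_num
    rw [e]
  have hi6 : n >>> (6:Int) = n / 64 := by simpa using (Int.shiftRight_natCast_right n 6).trans hb6
  have hi12 : n >>> (12:Int) = n / 4096 := by simpa using (Int.shiftRight_natCast_right n 12).trans hb12
  have hi18 : n >>> (18:Int) = n / 262144 := by simpa using (Int.shiftRight_natCast_right n 18).trans hb18
  have hm1 := band_mask_eq_self_iff (n / 64) 5 (by omega)
  norm_num at hm1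
  have hc1 : ¬ (PySem.Int.band (n / 64) 31 = n / 64) := fun hC => absurd (hm1.mp hC) (by omega)
  have hm2 := band_mask_eq_self_iff (n / 4096) 4 (by omega)
  norm_num at hm2
  have hc2 : ¬ (PySem.Int.band (n / 4096) 15 = n / 4096) := fun hC => absurd (hm2.mp hC) (by omega)
  have hm3 := band_mask_eq_self_iff (n / 262144) 3 (by omega)
  norm_num at hm3
  have hc3 : PySem.Int.band (n / 262144) 7 = n / 262144 := hm3.mpr (by omega)
  have hbl1 := lt_bitLength n 11 (by (have e : ((2:Int)^11) = 2048 := by norm_num); omega)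
  have hbl2 := lt_bitLength n 16 (by (have e : ((2:Int)^16) = 65536 := by norm_num); omega)
  have hble : PySem.Int.bitLength n ≤ 21 := bitLength_le n 21 (by (have e : ((2:Int)^21) = 2097152 := by norm_num); omega) hn0
  have el : PySem.Int.bxor 254 ((7:Int) <<< (1:Nat)) = 240 := by decide
  simp only [utf32to8, utf32to8_alt]
  rw [if_neg (by omega), if_neg (by omega)]
  rw [show (64:Nat) = 63+1 from rfl, loop_step, hs1]
  rw [if_neg hc1]
  rw [show (63:Nat) = 62+1 from rfl, loop_step, hs2]
  rw [show (31:Int) >>> (1:Nat) = 15 from by decide]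
  rw [if_neg hc2]
  rw [show (62:Nat) = 61+1 from rfl, loop_step, hs3]
  rw [show (15:Int) >>> (1:Nat) = 7 from by decide]
  rw [if_pos hc3, el]
  rw [if_neg (show ¬((PySem.Int.bitLength n : Int) > 31) by omega)]
  rw [if_neg (show ¬((PySem.Int.bitLength n : Int) ≤ 11) by omega)]
  rw [if_neg (show ¬((PySem.Int.bitLength n : Int) ≤ 16) by omega)]
  rw [if_pos (show ((PySem.Int.bitLength n : Int) ≤ 21) by omega)]
  have hr : PySem.List.pyRange (2) (-1) (-1) = [2, 1, 0] := by decide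
  have hlead : (256:Int) >>> (4:Nat) = 16 := by decide
  have t4 : ((4:Int)).toNat = 4 := rfl
  have t6 : ((6:Int)).toNat = 6 := rfl
  have t12 : ((12:Int)).toNat = 12 := rfl
  have t18 : ((18:Int)).toNat = 18 := rfl
  have hz : n >>> (0:Nat) = n := by rw [Int.shiftRight_eq_div_pow]; norm_num
  have hz' : n >>> (0:Int) = n := by simpa using (Int.shiftRight_natCast_right n 0).trans hz
  norm_num [hr, hlead, t4, t6, t12, t18, hz, hz', hb6, hb12, hb18, hi6, hi12, hi18]

lemma case4 (n : Int) (h1 : 2097152 ≤ n) (h2 : n < 67108864) : utf32to8 n = utf32to8_alt n := by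
  have hn0 : (0:Int) ≤ n := by omega
  have e64 : (((2:Nat)^6 : Nat) : Int) = 64 := by norm_num
  have hs1 : n >>> (6:Nat) = n / 64 := by rw [Int.shiftRight_eq_div_pow, e64]
  have hs2 : (n / 64) >>> (6:Nat) = n / 4096 := by rw [Int.shiftRight_eq_div_pow, e64]; omega
  have hs3 : (n / 4096) >>> (6:Nat) = n / 262144 := by rw [Int.shiftRight_eq_div_pow, e64]; omega
  have hs4 : (n / 262144) >>> (6:Nat) = n / 16777216 := by rw [Int.shiftRight_eq_div_pow, e64]; omega
  have hb6 : n >>> (6:Nat) = n / 64 := hs1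
  have hb12 : n >>> (12:Nat) = n / 4096 := by
    rw [Int.shiftRight_eq_div_pow]
    have e : (((2:Nat)^12 : Nat) : Int) = 4096 := by norm_num
    rw [e]
  have hb18 : n >>> (18:Nat) = n / 262144 := by
    rw [Int.shiftRight_eq_div_pow]
    have e : (((2:Nat)^18 : Nat) : Int) = 262144 := by norm_num
    rw [e]
  have hb24 : n >>> (24:Nat) = n / 16777216 := by
    rw [Int.shiftRight_eq_div_pow]
    have e : (((2:Nat)^24 : Nat) : Int) = 16777216 := by norm_num
    rw [e]
  have hi6 : n >>> (6:Int) = n / 64 := by simpa using (Int.shiftRight_natCast_right n 6).trans hb6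
  have hi12 : n >>> (12:Int) = n / 4096 := by simpa using (Int.shiftRight_natCast_right n 12).trans hb12
  have hi18 : n >>> (18:Int) = n / 262144 := by simpa using (Int.shiftRight_natCast_right n 18).trans hb18
  have hi24 : n >>> (24:Int) = n / 16777216 := by simpa using (Int.shiftRight_natCast_right n 24).trans hb24
  have hm1 := band_mask_eq_self_iff (n / 64) 5 (by omega)
  norm_num at hm1
  have hc1 : ¬ (PySem.Int.band (n / 64) 31 = n / 64) := fun hC => absurd (hm1.mp hC) (by omega)
  have hm2 := band_mask_eq_self_iff (n / 4096) 4 (by omega)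
  norm_num at hm2
  have hc2 : ¬ (PySem.Int.band (n / 4096) 15 = n / 4096) := fun hC => absurd (hm2.mp hC) (by omega)
  have hm3 := band_mask_eq_self_iff (n / 262144) 3 (by omega)
  norm_num at hm3
  have hc3 : ¬ (PySem.Int.band (n / 262144) 7 = n / 262144) := fun hC => absurd (hm3.mp hC) (by omega)
  have hm4 := band_mask_eq_self_iff (n / 16777216) 2 (by omega)
  norm_num at hm4
  have hc4 : PySem.Int.band (n / 16777216) 3 = n / 16777216 := hm4.mpr (by omega)
  have hbl1 := lt_bitLength n 11 (by (have e : ((2:Int)^11) = 2048 := by norm_num); omega)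
  have hbl2 := lt_bitLength n 16 (by (have e : ((2:Int)^16) = 65536 := by norm_num); omega)
  have hbl3 := lt_bitLength n 21 (by (have e : ((2:Int)^21) = 2097152 := by norm_num); omega)
  have hble : PySem.Int.bitLength n ≤ 26 := bitLength_le n 26 (by (have e : ((2:Int)^26) = 67108864 := by norm_num); omega) hn0
  have el : PySem.Int.bxor 254 ((3:Int) <<< (1:Nat)) = 248 := by decide
  simp only [utf32to8, utf32to8_alt]
  rw [if_neg (by omega), if_neg (by omega)]
  rw [show (64:Nat) = 63+1 from rfl, loop_step, hs1]
  rw [if_neg hc1]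
  rw [show (63:Nat) = 62+1 from rfl, loop_step, hs2]
  rw [show (31:Int) >>> (1:Nat) = 15 from by decide]
  rw [if_neg hc2]
  rw [show (62:Nat) = 61+1 from rfl, loop_step, hs3]
  rw [show (15:Int) >>> (1:Nat) = 7 from by decide]
  rw [if_neg hc3]
  rw [show (61:Nat) = 60+1 from rfl, loop_step, hs4]
  rw [show (7:Int) >>> (1:Nat) = 3 from by decide]
  rw [if_pos hc4, el]
  rw [if_neg (show ¬((PySem.Int.bitLength n : Int) > 31) by omega)]
  rw [if_neg (show ¬((PySem.Int.bitLength n : Int) ≤ 11) by omega)]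
  rw [if_neg (show ¬((PySem.Int.bitLength n : Int) ≤ 16) by omega)]
  rw [if_neg (show ¬((PySem.Int.bitLength n : Int) ≤ 21) by omega)]
  rw [if_pos (show ((PySem.Int.bitLength n : Int) ≤ 26) by omega)]
  have hr : PySem.List.pyRange (3) (-1) (-1) = [3, 2, 1, 0] := by decide
  have hlead : (256:Int) >>> (5:Nat) = 8 := by decide
  have t5 : ((5:Int)).toNat = 5 := rfl
  have t6 : ((6:Int)).toNat = 6 := rfl
  have t12 : ((12:Int)).toNat = 12 := rfl
  have t18 : ((18:Int)).toNat = 18 := rfl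
  have t24 : ((24:Int)).toNat = 24 := rfl
  have hz : n >>> (0:Nat) = n := by rw [Int.shiftRight_eq_div_pow]; norm_num
  have hz' : n >>> (0:Int) = n := by simpa using (Int.shiftRight_natCast_right n 0).trans hz
  norm_num [hr, hlead, t5, t6, t12, t18, t24, hz, hz', hb6, hb12, hb18, hb24, hi6, hi12, hi18, hi24]

lemma case5 (n : Int) (h1 : 67108864 ≤ n) (h2 : n < 2147483648) : utf32to8 n = utf32to8_alt n := by
  have hn0 : (0:Int) ≤ n := by omega
  have e64 : (((2:Nat)^6 : Nat) : Int) = 64 := by norm_num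
  have hs1 : n >>> (6:Nat) = n / 64 := by rw [Int.shiftRight_eq_div_pow, e64]
  have hs2 : (n / 64) >>> (6:Nat) = n / 4096 := by rw [Int.shiftRight_eq_div_pow, e64]; omega
  have hs3 : (n / 4096) >>> (6:Nat) = n / 262144 := by rw [Int.shiftRight_eq_div_pow, e64]; omega
  have hs4 : (n / 262144) >>> (6:Nat) = n / 16777216 := by rw [Int.shiftRight_eq_div_pow, e64]; omega
  have hs5 : (n / 16777216) >>> (6:Nat) = n / 1073741824 := by rw [Int.shiftRight_eq_div_pow, e64]; omega
  have hb6 : n >>> (6:Nat) = n / 64 := hs1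
  have hb12 : n >>> (12:Nat) = n / 4096 := by
    rw [Int.shiftRight_eq_div_pow]
    have e : (((2:Nat)^12 : Nat) : Int) = 4096 := by norm_num
    rw [e]
  have hb18 : n >>> (18:Nat) = n / 262144 := by
    rw [Int.shiftRight_eq_div_pow]
    have e : (((2:Nat)^18 : Nat) : Int) = 262144 := by norm_num
    rw [e]
  have hb24 : n >>> (24:Nat) = n / 16777216 := by
    rw [Int.shiftRight_eq_div_pow]
    have e : (((2:Nat)^24 : Nat) : Int) = 16777216 := by norm_num
    rw [e]
  have hb30 : n >>> (30:Nat) = n / 1073741824 := by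
    rw [Int.shiftRight_eq_div_pow]
    have e : (((2:Nat)^30 : Nat) : Int) = 1073741824 := by norm_num
    rw [e]
  have hi6 : n >>> (6:Int) = n / 64 := by simpa using (Int.shiftRight_natCast_right n 6).trans hb6
  have hi12 : n >>> (12:Int) = n / 4096 := by simpa using (Int.shiftRight_natCast_right n 12).trans hb12
  have hi18 : n >>> (18:Int) = n / 262144 := by simpa using (Int.shiftRight_natCast_right n 18).trans hb18
  have hi24 : n >>> (24:Int) = n / 16777216 := by simpa using (Int.shiftRight_natCast_right n 24).trans hb24
  have hi30 : n >>> (30:Int) = n / 1073741824 := by simpa using (Int.shiftRight_natCast_right n 30).trans hb30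
  have hm1 := band_mask_eq_self_iff (n / 64) 5 (by omega)
  norm_num at hm1
  have hc1 : ¬ (PySem.Int.band (n / 64) 31 = n / 64) := fun hC => absurd (hm1.mp hC) (by omega)
  have hm2 := band_mask_eq_self_iff (n / 4096) 4 (by omega)
  norm_num at hm2
  have hc2 : ¬ (PySem.Int.band (n / 4096) 15 = n / 4096) := fun hC => absurd (hm2.mp hC) (by omega)
  have hm3 := band_mask_eq_self_iff (n / 262144) 3 (by omega)
  norm_num at hm3
  have hc3 : ¬ (PySem.Int.band (n / 262144) 7 = n / 262144) := fun hC => absurd (hm3.mp hC) (by omega)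
  have hm4 := band_mask_eq_self_iff (n / 16777216) 2 (by omega)
  norm_num at hm4
  have hc4 : ¬ (PySem.Int.band (n / 16777216) 3 = n / 16777216) := fun hC => absurd (hm4.mp hC) (by omega)
  have hm5 := band_mask_eq_self_iff (n / 1073741824) 1 (by omega)
  norm_num at hm5
  have hc5 : PySem.Int.band (n / 1073741824) 1 = n / 1073741824 := hm5.mpr (by omega)
  have hbl1 := lt_bitLength n 11 (by (have e : ((2:Int)^11) = 2048 := by norm_num); omega)
  have hbl2 := lt_bitLength n 16 (by (have e : ((2:Int)^16) = 65536 := by norm_num); omega)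
  have hbl3 := lt_bitLength n 21 (by (have e : ((2:Int)^21) = 2097152 := by norm_num); omega)
  have hbl4 := lt_bitLength n 26 (by (have e : ((2:Int)^26) = 67108864 := by norm_num); omega)
  have hble : PySem.Int.bitLength n ≤ 31 := bitLength_le n 31 (by (have e : ((2:Int)^31) = 2147483648 := by norm_num); omega) hn0
  have el : PySem.Int.bxor 254 ((1:Int) <<< (1:Nat)) = 252 := by decide
  simp only [utf32to8, utf32to8_alt]
  rw [if_neg (by omega), if_neg (by omega)]
  rw [show (64:Nat) = 63+1 from rfl, loop_step, hs1]
  rw [if_neg hc1]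
  rw [show (63:Nat) = 62+1 from rfl, loop_step, hs2]
  rw [show (31:Int) >>> (1:Nat) = 15 from by decide]
  rw [if_neg hc2]
  rw [show (62:Nat) = 61+1 from rfl, loop_step, hs3]
  rw [show (15:Int) >>> (1:Nat) = 7 from by decide]
  rw [if_neg hc3]
  rw [show (61:Nat) = 60+1 from rfl, loop_step, hs4]
  rw [show (7:Int) >>> (1:Nat) = 3 from by decide]
  rw [if_neg hc4]
  rw [show (60:Nat) = 59+1 from rfl, loop_step, hs5]
  rw [show (3:Int) >>> (1:Nat) = 1 from by decide]
  rw [if_pos hc5, el]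
  rw [if_neg (show ¬((PySem.Int.bitLength n : Int) > 31) by omega)]
  rw [if_neg (show ¬((PySem.Int.bitLength n : Int) ≤ 11) by omega)]
  rw [if_neg (show ¬((PySem.Int.bitLength n : Int) ≤ 16) by omega)]
  rw [if_neg (show ¬((PySem.Int.bitLength n : Int) ≤ 21) by omega)]
  rw [if_neg (show ¬((PySem.Int.bitLength n : Int) ≤ 26) by omega)]
  have hr : PySem.List.pyRange (4) (-1) (-1) = [4, 3, 2, 1, 0] := by decide
  have hlead : (256:Int) >>> (6:Nat) = 4 := by decide
  have t6 : ((6:Int)).toNat = 6 := rfl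
  have t12 : ((12:Int)).toNat = 12 := rfl
  have t18 : ((18:Int)).toNat = 18 := rfl
  have t24 : ((24:Int)).toNat = 24 := rfl
  have t30 : ((30:Int)).toNat = 30 := rfl
  have hz : n >>> (0:Nat) = n := by rw [Int.shiftRight_eq_div_pow]; norm_num
  have hz' : n >>> (0:Int) = n := by simpa using (Int.shiftRight_natCast_right n 0).trans hz
  norm_num [hr, hlead, t6, t12, t18, t24, t30, hz, hz', hb6, hb12, hb18, hb24, hb30, hi6, hi12, hi18, hi24, hi30]

-- ===== VERDICT (by name: the statement is the Claim_ definition above) =====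
theorem utf32to8_spec : Claim_equal_utf32to8 := by
  intro n hdom hpre
  unfold Spec_utf32to8
  have hd : -2147483648 ≤ n ∧ n ≤ 2147483648 := by
    simpa [Dom_utf32to8, pvDomInt] using hdom
  have hp : n ≤ 2147483647 := hpre
  by_cases h0 : n < 128
  · unfold utf32to8 utf32to8_alt; rw [if_pos h0, if_pos h0]
  by_cases h1 : n < 2048
  · exact case1 n (by omega) h1
  by_cases h2 : n < 65536
  · exact case2 n (by omega) h2
  by_cases h3 : n < 2097152
  · exact case3 n (by omega) h3
  by_cases h4 : n < 67108864
  · exact case4 n (by omega) h4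
  · exact case5 n (by omega) (by omega)
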